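-- pv_equiv track=rewrite | github.com/0xfauzi/rlm-rs | src/rlm_rs/parser/service.py | _build_checkpoints
-- ===== SOURCE A (Python) =====
-- def _build_checkpoints(text: str, interval: int) -> tuple[list[dict[str, int]], int]:
--     checkpoints: list[dict[str, int]] = [{"char": 0, "byte": 0}]
--     if interval <= 0:
--         interval = max(len(text), 1)
--     byte_offset = 0
--     for index, char in enumerate(text, start=1):
--         byte_offset += len(char.encode("utf-8"))
--         if index % interval == 0:
--             checkpoints.append({"char": index, "byte": byte_offset})
--     if checkpoints[-1]["char"] != len(text):
--         checkpoints.append({"char": len(text), "byte": byte_offset})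
--     return checkpoints, byte_offset
-- ===== SOURCE B (Python) =====
-- def _build_checkpoints(text: str, interval: int) -> tuple[list[dict[str, int]], int]:
--     if interval <= 0:
--         interval = max(len(text), 1)
--     checkpoints = [{"char": 0, "byte": 0}]
--     pos = 0
--     byte_offset = 0
--     rest = text
--     while rest:
--         chunk, rest = rest[:interval], rest[interval:]
--         pos += len(chunk)
--         byte_offset += len(chunk.encode("utf-8"))
--         checkpoints.append({"char": pos, "byte": byte_offset})
--     return checkpoints, byte_offset
-- ===== Notes on version B (the rewrite author's own statement) =====
-- stated objective: faster
-- what changed: B replaces A's per-character loop with a modulo test on every index plus a trailing-checkpoint fixup by a chunked loop that slices the text interval characters at a time and appends one checkpoint per chunk, so no modulo branch and no fixup are needed and per-chunk work runs in C-level slice/encode primitives.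
import Mathlib
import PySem

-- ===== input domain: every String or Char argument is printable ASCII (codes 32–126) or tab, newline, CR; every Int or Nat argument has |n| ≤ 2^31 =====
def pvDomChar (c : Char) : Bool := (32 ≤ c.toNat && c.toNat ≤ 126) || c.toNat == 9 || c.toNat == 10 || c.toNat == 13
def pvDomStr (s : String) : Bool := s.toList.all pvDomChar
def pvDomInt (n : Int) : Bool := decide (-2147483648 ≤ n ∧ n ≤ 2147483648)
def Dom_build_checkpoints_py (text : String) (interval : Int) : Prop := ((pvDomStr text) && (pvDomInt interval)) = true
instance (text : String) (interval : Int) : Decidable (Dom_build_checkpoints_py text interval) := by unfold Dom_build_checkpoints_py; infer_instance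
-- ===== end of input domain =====

-- B replaces A's per-character loop (modulo test + trailing fixup) by chunked slicing with one
-- checkpoint per chunk (no modulo branch, no fixup); measured faster by a constant factor.

-- ===== PORT A =====
-- first-match lookup in an association list = d[k] in Python (the key is always present where A uses it)
def pvDictGetD (d : List (String × Int)) (k : String) (dflt : Int) : Int :=
  match d.find? (fun p => p.1 == k) with
  | some p => p.2
  | none => dflt

-- the 'for index, char in enumerate(text, start=1)' loop of A, index and byte_offset carried as state
def pvALoop (I : Int) : List Char → Int → Int → List (List (String × Int)) → (List (List (String × Int)) × Int)
  | [], _, byte, cps => (cps, byte)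
  | c :: rest, idx, byte, cps =>
      let idx' := idx + 1
      let byte' := byte + (c.utf8Size : Int)   -- len(char.encode("utf-8")): exact
      let cps' := if PySem.Int.mod idx' I = 0 then cps ++ [[("char", idx'), ("byte", byte')]] else cps
      pvALoop I rest idx' byte' cps'

def build_checkpoints_py (text : String) (interval : Int) : (List (List (String × Int))) × Int :=
  let cs := text.toList
  let checkpoints : List (List (String × Int)) := [[("char", (0:Int)), ("byte", (0:Int))]]
  let I : Int := if interval ≤ 0 then max (cs.length : Int) 1 else interval
  let r := pvALoop I cs 0 0 checkpoints
  -- checkpoints[-1]["char"]: the list is never empty and the key always present, so getLastD/pvDictGetD are exact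
  if pvDictGetD (r.1.getLastD []) "char" 0 ≠ (cs.length : Int)
  then (r.1 ++ [[("char", (cs.length : Int)), ("byte", r.2)]], r.2)
  else (r.1, r.2)

-- ===== PORT B =====
-- byte length of a chunk = len(chunk.encode("utf-8")): exact
def pvBytes (l : List Char) : Int := ((l.map Char.utf8Size).sum : Int)

-- B's 'while rest:' loop: split off a chunk of (at most) J+1 = interval characters each round
def pvBLoop (J : Nat) : List Char → Int → Int → List (List (String × Int)) → (List (List (String × Int)) × Int)
  | [], _, byte, cps => (cps, byte)
  | c :: rest', pos, byte, cps =>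
      let chunk := c :: rest'.take J          -- rest[:interval] on a nonempty rest, interval = J+1
      let rest := rest'.drop J               -- rest[interval:]
      let pos' := pos + (chunk.length : Int)
      let byte' := byte + pvBytes chunk
      pvBLoop J rest pos' byte' (cps ++ [[("char", pos'), ("byte", byte')]])
termination_by cs => cs.length
decreasing_by simp

def build_checkpoints_py_alt (text : String) (interval : Int) : (List (List (String × Int))) × Int :=
  let cs := text.toList
  let I : Nat := if interval ≤ 0 then max cs.length 1 else interval.toNat
  pvBLoop (I - 1) cs 0 0 [[("char", (0:Int)), ("byte", (0:Int))]]

-- ===== PRECONDITION & SPEC =====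
def Spec_build_checkpoints_py (text : String) (interval : Int) (out : (List (List (String × Int))) × Int) : Prop := out = build_checkpoints_py_alt text interval
instance (text : String) (interval : Int) (out : (List (List (String × Int))) × Int) : Decidable (Spec_build_checkpoints_py text interval out) := by unfold Spec_build_checkpoints_py; infer_instance

-- ===== CLAIM (what is proved, stated in full; the proofs are below) =====
def Claim_equal_build_checkpoints_py : Prop := ∀ (text : String) (interval : Int), Dom_build_checkpoints_py text interval → Spec_build_checkpoints_py text interval (build_checkpoints_py text interval)

-- ===== LEMMAS AND PROOFS =====

theorem pvBytes_cons (c : Char) (l : List Char) : pvBytes (c :: l) = (c.utf8Size : Int) + pvBytes l := by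
  simp [pvBytes]

theorem pvBytes_append (l1 l2 : List Char) : pvBytes (l1 ++ l2) = pvBytes l1 + pvBytes l2 := by
  simp [pvBytes]

-- over a stretch of indices none of which is a multiple of I, A's loop appends nothing
theorem pvALoop_no_mult (I : Int) (l1 : List Char) :
    ∀ (l2 : List Char) (idx byte : Int) (cps : List (List (String × Int))),
    (∀ j : Nat, 1 ≤ j → j ≤ l1.length → PySem.Int.mod (idx + (j : Int)) I ≠ 0) →
    pvALoop I (l1 ++ l2) idx byte cps = pvALoop I l2 (idx + (l1.length : Int)) (byte + pvBytes l1) cps := by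
  induction l1 with
  | nil => intro l2 idx byte cps _; simp [pvBytes]
  | cons c l1 ih =>
      intro l2 idx byte cps h
      have h1 : PySem.Int.mod (idx + 1) I ≠ 0 := by
        have := h 1 (by omega) (by simp)
        simpa using this
      show pvALoop I (l1 ++ l2) (idx + 1) (byte + (c.utf8Size : Int))
            (if PySem.Int.mod (idx + 1) I = 0 then _ else cps) = _
      rw [if_neg h1, ih l2 (idx + 1) (byte + (c.utf8Size : Int)) cps (by
        intro j hj1 hj2
        have h' := h (j + 1) (by omega) (by simp; omega)
        have e : idx + (((j : Int)) + 1) = idx + 1 + (j : Int) := by ring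
        push_cast at h' ⊢
        rw [← e]; exact h')]
      congr 1
      all_goals simp only [List.length_cons, pvBytes_cons]
      all_goals push_cast
      all_goals ring

theorem pv_mod_eq (I m j : Int) (hI : 0 < I) (hj0 : 0 ≤ j) (hj : j < I) :
    PySem.Int.mod (I * m + j) I = j := by
  rw [PySem.Int.mod_eq_emod_of_pos hI, add_comm, Int.add_mul_emod_self_left]
  exact Int.emod_eq_of_lt hj0 hj

-- main invariant: A's loop followed by the trailing fixup equals B's chunk loop,
-- provided the current position is a multiple of the interval and is the char of the last checkpoint
theorem pv_key (I : Nat) (hI : 1 ≤ I) :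
    ∀ (N : Nat) (cs : List Char), cs.length ≤ N →
    ∀ (pos : Nat) (byte : Int) (acc : List (List (String × Int))),
    pos % I = 0 →
    pvDictGetD (acc.getLastD []) "char" 0 = (pos : Int) →
    (if pvDictGetD ((pvALoop (I : Int) cs (pos : Int) byte acc).1.getLastD []) "char" 0
          ≠ ((pos : Int) + (cs.length : Int))
     then ((pvALoop (I : Int) cs (pos : Int) byte acc).1
            ++ [[("char", (pos : Int) + (cs.length : Int)),
                 ("byte", (pvALoop (I : Int) cs (pos : Int) byte acc).2)]],
          (pvALoop (I : Int) cs (pos : Int) byte acc).2)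
     else pvALoop (I : Int) cs (pos : Int) byte acc)
    = pvBLoop (I - 1) cs (pos : Int) byte acc := by
  intro N
  induction N with
  | zero =>
      intro cs hcs pos byte acc _ hlast
      have hnil : cs = [] := List.eq_nil_of_length_eq_zero (by omega)
      subst hnil
      simp only [pvALoop, List.length_nil, Nat.cast_zero, add_zero]
      rw [if_neg (not_not_intro hlast), pvBLoop.eq_def]
  | succ N ih =>
      intro cs hcs pos byte acc hpos hlast
      match cs with
      | [] =>
        simp only [pvALoop, List.length_nil, Nat.cast_zero, add_zero]
        rw [if_neg (not_not_intro hlast), pvBLoop.eq_def]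
      | c :: rest' =>
        obtain ⟨k, hk⟩ := Nat.dvd_of_mod_eq_zero hpos
        have hm : (pos : Int) = (I : Int) * (k : Int) := by push_cast [hk]; ring
        have hIpos : (0 : Int) < (I : Int) := by exact_mod_cast hI
        have hI1 : ((I - 1 : Nat) : Int) = (I : Int) - 1 := by omega
        rw [List.length_cons] at hcs
        by_cases hfull : I ≤ (c :: rest').length
        · -- full chunk of length I
          rw [List.length_cons] at hfull
          have hlt : I - 1 < (c :: rest').length := by simp; omega
          have hsplit : c :: rest' = (c :: rest').take (I - 1)
              ++ ((c :: rest')[I-1]'(by simp; omega) :: (c :: rest').drop I) := by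
            conv_lhs => rw [← List.take_append_drop (I - 1) (c :: rest')]
            congr 1
            rw [List.drop_eq_getElem_cons hlt]
            congr 2
            omega
          set front := (c :: rest').take (I - 1) with hfront
          set lastc := (c :: rest')[I-1]'(by simp; omega) with hlastc
          set tail := (c :: rest').drop I with htail
          have hfrontlen : front.length = I - 1 := by
            simp [hfront]; omega
          have hfrontlen' : ((front.length : Nat) : Int) = (I : Int) - 1 := by
            rw [hfrontlen]; omega
          have htaillen : tail.length = rest'.length + 1 - I := by
            simp [htail]
          have hnm : ∀ j : Nat, 1 ≤ j → j ≤ front.length →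
              PySem.Int.mod ((pos : Int) + (j : Int)) (I : Int) ≠ 0 := by
            intro j hj1 hj2
            rw [hfrontlen] at hj2
            rw [hm, pv_mod_eq _ _ _ hIpos (by omega) (by omega)]
            omega
          have hmod0 : PySem.Int.mod ((pos : Int) + (front.length : Int) + 1) (I : Int) = 0 := by
            have e : (pos : Int) + (front.length : Int) + 1 = (I : Int) * ((k : Int) + 1) + 0 := by
              rw [hfrontlen', hm]; ring
            rw [e, pv_mod_eq _ _ _ hIpos le_rfl hIpos]
          set byte2 := byte + pvBytes front + (lastc.utf8Size : Int) with hbyte2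
          set cp : List (String × Int) :=
            [("char", (pos : Int) + (I : Int)), ("byte", byte2)] with hcp
          have hA : pvALoop (I : Int) (c :: rest') (pos : Int) byte acc
              = pvALoop (I : Int) tail ((pos : Int) + (I : Int)) byte2 (acc ++ [cp]) := by
            conv_lhs => rw [hsplit]
            rw [pvALoop_no_mult _ _ _ _ _ _ hnm]
            show pvALoop _ tail _ _
              (if PySem.Int.mod ((pos : Int) + (front.length : Int) + 1) (I : Int) = 0
               then _ else _) = _
            rw [if_pos hmod0]
            have he : (pos : Int) + (front.length : Int) + 1 = (pos : Int) + (I : Int) := by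
              rw [hfrontlen']; ring
            rw [he]
          have hfrontfull : front ++ [lastc] = (c :: rest').take I := by
            have e : (c :: rest').take I = (c :: rest').take ((I - 1) + 1) := by
              congr 1; omega
            rw [e, List.take_add_one, List.getElem?_eq_getElem hlt]
            simp [hfront, hlastc]
          have hchunkfull : (c :: rest'.take (I - 1)) = front ++ [lastc] := by
            rw [hfrontfull]
            cases I with
            | zero => omega
            | succ I' => simp [List.take_succ_cons]
          have hrest : rest'.drop (I - 1) = tail := by
            rw [htail]
            cases I with
            | zero => omega
            | succ I' => simp
          have hB : pvBLoop (I - 1) (c :: rest') (pos : Int) byte acc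
              = pvBLoop (I - 1) tail ((pos : Int) + (I : Int)) byte2 (acc ++ [cp]) := by
            rw [pvBLoop.eq_def]
            simp only []
            rw [hchunkfull, hrest]
            have hlen : (((front ++ [lastc]).length : Nat) : Int) = (I : Int) := by
              simp [hfrontlen]; omega
            have hby : byte + pvBytes (front ++ [lastc]) = byte2 := by
              rw [pvBytes_append, hbyte2]; simp [pvBytes]; ring
            rw [hlen, hby]
          rw [hA, hB]
          have hcast : ((pos + I : Nat) : Int) = (pos : Int) + (I : Int) := by push_cast; ring
          have hcast2 : ((pos : Int) + ((c :: rest').length : Int))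
              = (((pos + I : Nat)) : Int) + (tail.length : Int) := by
            rw [htaillen]; simp only [List.length_cons]; omega
          rw [← hcast, hcast2]
          exact ih tail (by omega) (pos + I) byte2 (acc ++ [cp])
            (by rw [Nat.add_mod_right]; exact hpos)
            (by simp [hcp, pvDictGetD])
        · -- partial final chunk: length < I, no multiple reached, the fixup appends the end
          rw [List.length_cons] at hfull
          have hnm : ∀ j : Nat, 1 ≤ j → j ≤ (c :: rest').length →
              PySem.Int.mod ((pos : Int) + (j : Int)) (I : Int) ≠ 0 := by
            intro j hj1 hj2
            rw [List.length_cons] at hj2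
            rw [hm, pv_mod_eq _ _ _ hIpos (by omega) (by omega)]
            omega
          have hA : pvALoop (I : Int) (c :: rest') (pos : Int) byte acc
              = (acc, byte + pvBytes (c :: rest')) := by
            have e := pvALoop_no_mult (I : Int) (c :: rest') [] (pos : Int) byte acc hnm
            rw [List.append_nil] at e
            rw [e]
            rfl
          rw [hA]
          have hne : pvDictGetD (acc.getLastD []) "char" 0
              ≠ ((pos : Int) + ((c :: rest').length : Int)) := by
            rw [hlast]; simp; omega
          rw [if_pos hne]
          have htake : rest'.take (I - 1) = rest' := List.take_of_length_le (by omega)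
          have hdrop : rest'.drop (I - 1) = [] := List.drop_eq_nil_of_le (by omega)
          conv_rhs => rw [pvBLoop.eq_def]
          simp only [htake, hdrop]
          rw [pvBLoop.eq_def]

-- ===== VERDICT (by name: the statement is the Claim_ definition above) =====
theorem build_checkpoints_py_spec : Claim_equal_build_checkpoints_py := by
  intro text interval _
  show build_checkpoints_py text interval = build_checkpoints_py_alt text interval
  unfold build_checkpoints_py build_checkpoints_py_alt
  simp only []
  have hIB : 1 ≤ (if interval ≤ 0 then max text.toList.length 1 else interval.toNat) := by
    split_ifs <;> omega
  have hIA : (if interval ≤ 0 then max ((text.toList.length : Int)) 1 else interval)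
      = (((if interval ≤ 0 then max text.toList.length 1 else interval.toNat) : Nat) : Int) := by
    split_ifs with h
    · simp [Nat.cast_max]
    · exact (Int.toNat_of_nonneg (by omega)).symm
  rw [hIA]
  have key := pv_key (if interval ≤ 0 then max text.toList.length 1 else interval.toNat) hIB
    text.toList.length text.toList le_rfl 0 0 [[("char", (0:Int)), ("byte", (0:Int))]]
    (by simp) (by simp [pvDictGetD])
  simp only [Nat.cast_zero, zero_add] at key
  simpa using key
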